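-- pv_equiv track=rewrite | github.com/doocs/leetcode | solution/3800-3899/3844.Longest Almost-Palindromic Substring/Solution.py | almostPalindromic
-- ===== SOURCE A (Python) =====
-- def almostPalindromic(s: str) -> int:
--     def f(l: int, r: int) -> int:
--         while l >= 0 and r < n and s[l] == s[r]:
--             l -= 1
--             r += 1
--         l1, r1 = l - 1, r
--         l2, r2 = l, r + 1
--         while l1 >= 0 and r1 < n and s[l1] == s[r1]:
--             l1 -= 1
--             r1 += 1
--         while l2 >= 0 and r2 < n and s[l2] == s[r2]:
--             l2 -= 1
--             r2 += 1
--         return min(n, max(r1 - l1 - 1, r2 - l2 - 1))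
--
--     n = len(s)
--     ans = 0
--     for i in range(n):
--         a = f(i, i)
--         b = f(i, i + 1)
--         ans = max(ans, a, b)
--     return ans
-- ===== SOURCE B (Python) =====
-- def almostPalindromic(s: str) -> int:
--     n = len(s)
--
--     def is_pal(i: int, j: int) -> bool:
--         while i < j:
--             if s[i] != s[j]:
--                 return False
--             i += 1
--             j -= 1
--         return True
--
--     def ok(i: int, j: int) -> bool:
--         # substring s[i..j] becomes a palindrome after deleting at most one character
--         while i < j and s[i] == s[j]:
--             i += 1
--             j -= 1
--         return i >= j or is_pal(i + 1, j) or is_pal(i, j - 1)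
--
--     best = 0
--     for length in range(1, n + 1):
--         if any(ok(i, i + length - 1) for i in range(n - length + 1)):
--             best = max(best, length)
--     return best
-- ===== Notes on version B (the rewrite author's own statement) =====
-- stated objective: alternative
-- what changed: A expands palindromes around each centre and continues the expansion across one skipped character; B instead enumerates substring lengths and checks each substring directly with the textbook two-pointer delete-at-most-one-character palindrome test, keeping the best feasible length.
import Mathlib
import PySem

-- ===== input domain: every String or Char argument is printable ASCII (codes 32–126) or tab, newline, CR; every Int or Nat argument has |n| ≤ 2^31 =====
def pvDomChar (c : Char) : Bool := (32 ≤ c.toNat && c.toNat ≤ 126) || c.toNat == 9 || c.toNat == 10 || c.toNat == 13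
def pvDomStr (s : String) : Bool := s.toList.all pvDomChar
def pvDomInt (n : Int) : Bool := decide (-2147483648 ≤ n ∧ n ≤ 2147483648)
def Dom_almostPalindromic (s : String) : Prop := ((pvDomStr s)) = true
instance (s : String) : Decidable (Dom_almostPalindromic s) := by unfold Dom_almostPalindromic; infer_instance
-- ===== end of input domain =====

-- B replaces A's centre-expansion-with-one-skip by a substring enumeration with a
-- textbook two-pointer delete-at-most-one-character palindrome check
-- (objective: alternative/simpler structure, not faster).

-- ===== PORT A =====
-- the three 'while l >= 0 and r < n and s[l] == s[r]' loops of A's helper f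
def pvExpand (cs : List Char) (n l r : Int) : Int × Int :=
  if h : 0 ≤ l ∧ r < n ∧ PySem.List.pyGet? cs l = PySem.List.pyGet? cs r then
    pvExpand cs n (l - 1) (r + 1)
  else (l, r)
termination_by (n - r).toNat
decreasing_by obtain ⟨h1, h2, h3⟩ := h; omega

-- A's helper f(l, r)
def pvFA (cs : List Char) (n l r : Int) : Int :=
  let p := pvExpand cs n l r
  let q := pvExpand cs n (p.1 - 1) p.2
  let t := pvExpand cs n p.1 (p.2 + 1)
  min n (max (q.2 - q.1 - 1) (t.2 - t.1 - 1))

def almostPalindromic (s : String) : Int :=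
  (PySem.List.pyRange 0 ((s.toList.length : Int)) 1).foldl
    (fun ans i =>
      max (max ans (pvFA s.toList ((s.toList.length : Int)) i i))
        (pvFA s.toList ((s.toList.length : Int)) i (i + 1))) 0

-- ===== PORT B =====
-- B's helper is_pal(i, j)
def pvIsPal (cs : List Char) (i j : Int) : Bool :=
  if h : i < j then
    if PySem.List.pyGet? cs i ≠ PySem.List.pyGet? cs j then false
    else pvIsPal cs (i + 1) (j - 1)
  else true
termination_by (j - i).toNat
decreasing_by omega

-- the 'while i < j and s[i] == s[j]' loop of B's helper ok
def pvWalk (cs : List Char) (i j : Int) : Int × Int :=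
  if h : i < j ∧ PySem.List.pyGet? cs i = PySem.List.pyGet? cs j then
    pvWalk cs (i + 1) (j - 1)
  else (i, j)
termination_by (j - i).toNat
decreasing_by obtain ⟨h1, h2⟩ := h; omega

-- B's helper ok(i, j)
def pvOk (cs : List Char) (i j : Int) : Bool :=
  let w := pvWalk cs i j
  decide (w.1 ≥ w.2) || pvIsPal cs (w.1 + 1) w.2 || pvIsPal cs w.1 (w.2 - 1)

def almostPalindromic_alt (s : String) : Int :=
  (PySem.List.pyRange 1 ((s.toList.length : Int) + 1) 1).foldl
    (fun best L =>
      if (PySem.List.pyRange 0 ((s.toList.length : Int) - L + 1) 1).any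
          (fun i => pvOk s.toList i (i + L - 1)) then
        max best L
      else best) 0

-- ===== PRECONDITION & SPEC =====
def Spec_almostPalindromic (s : String) (out : Int) : Prop := out = almostPalindromic_alt s
instance (s : String) (out : Int) : Decidable (Spec_almostPalindromic s out) := by unfold Spec_almostPalindromic; infer_instance

-- ===== CLAIM (what is proved, stated in full; the proofs are below) =====
def Claim_equal_almostPalindromic : Prop := ∀ (s : String), Dom_almostPalindromic s → Spec_almostPalindromic s (almostPalindromic s)

-- ===== LEMMAS AND PROOFS =====

-- character at a nonnegative index, total (proof-side only)
def pvG (cs : List Char) (p : Int) : Char := cs.getD p.toNat 'a'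

-- s[a..b] is a plain palindrome (pairs with index sum a+b)
def pvPal (cs : List Char) (a b : Int) : Prop :=
  ∀ p : Int, a ≤ p → 2 * p ≤ a + b → pvG cs p = pvG cs (a + b - p)

-- s[i..j] becomes a palindrome after deleting position k, hole on the left of centre:
-- mirror shell (sum i+j) down to the hole k, plain palindrome strictly inside
def pvHL (cs : List Char) (i j k : Int) : Prop :=
  i ≤ k ∧ k ≤ j ∧ (∀ p : Int, i ≤ p → p < k → pvG cs p = pvG cs (i + j - p)) ∧
    pvPal cs (k + 1) (i + j - k)

-- the same with the hole on the right of centre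
def pvHR (cs : List Char) (i j k : Int) : Prop :=
  i ≤ k ∧ k ≤ j ∧ (∀ q : Int, k < q → q ≤ j → pvG cs q = pvG cs (i + j - q)) ∧
    pvPal cs (i + j - k) (k - 1)

-- s[i..j] is almost palindromic (palindrome after deleting at most one character)
def pvAP (cs : List Char) (i j : Int) : Prop := ∃ k : Int, pvHL cs i j k ∨ pvHR cs i j k


-- reading a character through the Python index primitive
theorem pvGet_bridge (cs : List Char) (p : Int) (h0 : 0 ≤ p) (h1 : p < (cs.length : Int)) :
    PySem.List.pyGet? cs p = some (pvG cs p) := by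
  rw [PySem.List.pyGet?_eq_some_getElem cs h0 h1]
  unfold pvG
  rw [List.getD_eq_getElem _ _ (by omega)]

theorem pvCond_bridge (cs : List Char) (a b : Int) (h0 : 0 ≤ a) (h1 : a < (cs.length : Int))
    (h2 : 0 ≤ b) (h3 : b < (cs.length : Int)) :
    (PySem.List.pyGet? cs a = PySem.List.pyGet? cs b) ↔ pvG cs a = pvG cs b := by
  rw [pvGet_bridge cs a h0 h1, pvGet_bridge cs b h2 h3]
  exact ⟨fun h => Option.some.inj h, fun h => by rw [h]⟩

theorem pvExpand_of_stop (cs : List Char) (n l r : Int)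
    (h : ¬(0 ≤ l ∧ r < n ∧ PySem.List.pyGet? cs l = PySem.List.pyGet? cs r)) :
    pvExpand cs n l r = (l, r) := by
  rw [pvExpand]; simp [h]

theorem pvExpand_of_neg (cs : List Char) (n l r : Int) (h : l < 0) :
    pvExpand cs n l r = (l, r) :=
  pvExpand_of_stop cs n l r (fun hc => by omega)

theorem pvExpand_of_ge (cs : List Char) (n l r : Int) (h : n ≤ r) :
    pvExpand cs n l r = (l, r) :=
  pvExpand_of_stop cs n l r (fun hc => by obtain ⟨h1, h2, h3⟩ := hc; omega)

-- the invariant of A's expansion loop (no maximality needed)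
theorem pvExpand_spec (cs : List Char) (n l r : Int) (hn : n = (cs.length : Int)) (hr : 0 ≤ r) :
    (pvExpand cs n l r).1 + (pvExpand cs n l r).2 = l + r ∧
    (pvExpand cs n l r).1 ≤ l ∧ r ≤ (pvExpand cs n l r).2 ∧
    (∀ p : Int, (pvExpand cs n l r).1 < p → p ≤ l →
      0 ≤ p ∧ 0 ≤ l + r - p ∧ l + r - p < n ∧ pvG cs p = pvG cs (l + r - p)) ∧
    (r ≤ n → (pvExpand cs n l r).2 ≤ n) ∧ (-1 ≤ l → -1 ≤ (pvExpand cs n l r).1) := by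
  induction l, r using pvExpand.induct cs n with
  | case1 l r h ih =>
    obtain ⟨h1, h2, h3⟩ := h
    have hln : l < (cs.length : Int) := by
      by_contra hge
      have hnone : PySem.List.pyGet? cs l = none := by
        rw [PySem.List.pyGet?_eq_none_iff]
        intro hin
        have : l < (cs.length : Int) := hin.2
        omega
      rw [hnone, pvGet_bridge cs r hr (by omega)] at h3
      simp at h3
    have hstep : pvExpand cs n l r = pvExpand cs n (l - 1) (r + 1) := by
      rw [pvExpand]; simp only [h1, h2, h3, and_self, dite_true]
    have ih' := ih (by omega)
    rw [hstep]
    obtain ⟨s1, s2, s3, s4, s5, s6⟩ := ih'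
    refine ⟨by omega, by omega, by omega, ?_, fun hrn => s5 (by omega), fun hl => s6 (by omega)⟩
    intro p hp1 hp2
    rcases lt_or_ge (l - 1) p with hgt | hle
    · -- p = l : the pair matched in this step
      have hpl : p = l := by omega
      subst hpl
      refine ⟨h1, by omega, by omega, ?_⟩
      have harr : p + r - p = r := by omega
      have := (pvCond_bridge cs p r h1 (by omega) hr (by omega)).1 h3
      rw [show p + r - p = r by omega]
      exact this
    · have := s4 p hp1 hle
      rw [show (l - 1) + (r + 1) - p = l + r - p by omega] at this
      exact this
  | case2 l r h =>
    rw [pvExpand_of_stop cs n l r h]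
    exact ⟨rfl, le_refl _, le_refl _, fun p hp1 hp2 => absurd hp2 (by simp only at hp1 ⊢; omega),
      fun hrn => hrn, fun hl => hl⟩

-- the expansion loop runs at least as far as any matched stretch
theorem pvExpand_le (cs : List Char) (n l r a : Int) (hn : n = (cs.length : Int))
    (hr : 0 ≤ r) (hln : l < n) (ha : -1 ≤ a)
    (hm : ∀ p : Int, a < p → p ≤ l →
      0 ≤ p ∧ 0 ≤ l + r - p ∧ l + r - p < n ∧ pvG cs p = pvG cs (l + r - p)) :
    (pvExpand cs n l r).1 ≤ a := by
  induction l, r using pvExpand.induct cs n with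
  | case1 l r h ih =>
    have hstep : pvExpand cs n l r = pvExpand cs n (l - 1) (r + 1) := by
      rw [pvExpand]; simp only [h, and_self, dite_true]
    rw [hstep]
    by_cases hla : l ≤ a
    · have := (pvExpand_spec cs n (l - 1) (r + 1) hn (by omega)).2.1
      omega
    · refine ih (by omega) (by omega) ?_
      intro p hp1 hp2
      have := hm p hp1 (by omega)
      rw [show l - 1 + (r + 1) - p = l + r - p by omega]
      exact this
  | case2 l r h =>
    rw [pvExpand_of_stop cs n l r h]
    simp only
    by_contra hgt
    have hmm := hm l (by omega) (le_refl l)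
    rw [show l + r - l = r by omega] at hmm
    obtain ⟨m1, m2, m3, m4⟩ := hmm
    exact h ⟨m1, m3, (pvCond_bridge cs l r m1 (by omega) m2 (by omega)).2 m4⟩

-- ===== B-side loop characterisations =====

theorem pvIsPal_of_ge (cs : List Char) (i j : Int) (h : j ≤ i) : pvIsPal cs i j = true := by
  rw [pvIsPal]; simp [show ¬ i < j by omega]

-- pvPal on an empty or single-position span is trivial
theorem pvPal_of_ge (cs : List Char) (i j : Int) (h : j ≤ i) : pvPal cs i j := by
  intro p hp1 hp2
  have : 2 * p = i + j ∧ p = i := by omega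
  rw [show i + j - p = p by omega]

theorem pvPal_step (cs : List Char) (i j : Int) (h : i < j) :
    pvPal cs i j ↔ pvG cs i = pvG cs j ∧ pvPal cs (i + 1) (j - 1) := by
  constructor
  · intro hp
    refine ⟨?_, ?_⟩
    · have := hp i (le_refl i) (by omega)
      rwa [show i + j - i = j by omega] at this
    · intro p hp1 hp2
      have := hp p (by omega) (by omega)
      rwa [show i + j - p = (i + 1) + (j - 1) - p by omega] at this
  · rintro ⟨h1, h2⟩ p hp1 hp2
    rcases eq_or_lt_of_le hp1 with heq | hlt
    · rw [← heq, show i + j - i = j from by omega]; exact h1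
    · have := h2 p (by omega) (by omega)
      rwa [show (i + 1) + (j - 1) - p = i + j - p by omega] at this

theorem pvIsPal_iff (cs : List Char) (n : Int) (hn : n = (cs.length : Int)) :
    ∀ i j : Int, 0 ≤ i → j < n → (pvIsPal cs i j = true ↔ pvPal cs i j) := by
  intro i j
  induction i, j using pvIsPal.induct cs with
  | case1 i j hij hne =>
    intro h0 h1
    have hfalse : pvIsPal cs i j = false := by
      rw [pvIsPal]; simp [hij, hne]
    rw [hfalse]
    constructor
    · intro hf; exact absurd hf (by simp)
    · intro hp
      have := (pvPal_step cs i j hij).1 hp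
      exact absurd ((pvCond_bridge cs i j h0 (by omega) (by omega) (by omega)).2 this.1) hne
  | case2 i j hij hne ih =>
    intro h0 h1
    have hstep : pvIsPal cs i j = pvIsPal cs (i + 1) (j - 1) := by
      rw [pvIsPal]; simp [hij, hne]
    rw [hstep, ih (by omega) (by omega), pvPal_step cs i j hij]
    have heq : pvG cs i = pvG cs j := by
      have hne' : PySem.List.pyGet? cs i = PySem.List.pyGet? cs j := by
        by_contra hc; exact hne hc
      exact (pvCond_bridge cs i j h0 (by omega) (by omega) (by omega)).1 hne'
    simp [heq]
  | case3 i j hij =>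
    intro h0 h1
    rw [pvIsPal_of_ge cs i j (by omega)]
    simp only [true_iff]
    exact pvPal_of_ge cs i j (by omega)

theorem pvWalk_step (cs : List Char) (i j : Int)
    (h : i < j ∧ PySem.List.pyGet? cs i = PySem.List.pyGet? cs j) :
    pvWalk cs i j = pvWalk cs (i + 1) (j - 1) := by
  rw [pvWalk]; simp only [h, and_self, dite_true]

theorem pvWalk_stop (cs : List Char) (i j : Int)
    (h : ¬(i < j ∧ PySem.List.pyGet? cs i = PySem.List.pyGet? cs j)) :
    pvWalk cs i j = (i, j) := by
  rw [pvWalk]; simp [h]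

-- pvPal is monotone under shrinking the span symmetrically (same index sum)
theorem pvPal_mono (cs : List Char) (a b a' b' : Int) (hs : a + b = a' + b') (ha : a ≤ a')
    (h : pvPal cs a b) : pvPal cs a' b' := by
  intro p hp1 hp2
  have := h p (by omega) (by omega)
  rwa [show a + b - p = a' + b' - p by omega] at this

-- ===== almost-palindromicity: structural lemmas =====

theorem pvAP_len1 (cs : List Char) (i : Int) : pvAP cs i i :=
  ⟨i, Or.inl ⟨le_refl i, le_refl i, fun p hp1 hp2 => absurd hp2 (by omega), by
    rw [show i + i - i = i from by omega]
    exact pvPal_of_ge cs (i + 1) i (by omega)⟩⟩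

theorem pvAP_len2 (cs : List Char) (i : Int) : pvAP cs i (i + 1) :=
  ⟨i + 1, Or.inr ⟨by omega, le_refl _, fun q hq1 hq2 => absurd hq2 (by omega), by
    have : i + (i + 1) - (i + 1) = i ∧ (i + 1) - 1 = i := by omega
    rw [this.1, this.2]
    exact pvPal_of_ge cs i i (le_refl i)⟩⟩

theorem pvAP_of_pal (cs : List Char) (i j : Int) (hij : i ≤ j) (h : pvPal cs i j) :
    pvAP cs i j := by
  rcases Int.even_or_odd (i + j) with ⟨m, hm⟩ | ⟨m, hm⟩
  · -- i + j = 2 m : delete position m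
    refine ⟨m, Or.inl ⟨by omega, by omega, ?_, ?_⟩⟩
    · intro p hp1 hp2; exact h p hp1 (by omega)
    · exact pvPal_of_ge cs (m + 1) (i + j - m) (by omega)
  · -- i + j = 2 m + 1 : delete position m + 1
    refine ⟨m + 1, Or.inl ⟨by omega, by omega, ?_, ?_⟩⟩
    · intro p hp1 hp2; exact h p hp1 (by omega)
    · exact pvPal_of_ge cs (m + 1 + 1) (i + j - (m + 1)) (by omega)

-- growing an almost-palindrome by one matching pair of end characters
theorem pvAP_grow (cs : List Char) (i j : Int) (hij : i + 2 ≤ j) (he : pvG cs i = pvG cs j)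
    (h : pvAP cs (i + 1) (j - 1)) : pvAP cs i j := by
  obtain ⟨k, hk | hk⟩ := h
  · obtain ⟨k1, k2, k3, k4⟩ := hk
    refine ⟨k, Or.inl ⟨by omega, by omega, ?_, ?_⟩⟩
    · intro p hp1 hp2
      rcases eq_or_lt_of_le hp1 with heq | hlt
      · rw [← heq, show i + j - i = j from by omega]; exact he
      · have := k3 p (by omega) hp2
        rwa [show i + 1 + (j - 1) - p = i + j - p by omega] at this
    · rwa [show i + j - k = i + 1 + (j - 1) - k by omega]
  · obtain ⟨k1, k2, k3, k4⟩ := hk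
    refine ⟨k, Or.inr ⟨by omega, by omega, ?_, ?_⟩⟩
    · intro q hq1 hq2
      rcases eq_or_lt_of_le hq2 with heq | hlt
      · rw [heq, show i + j - j = i from by omega]; exact he.symm
      · have := k3 q hq1 (by omega)
        rwa [show i + 1 + (j - 1) - q = i + j - q by omega] at this
    · rwa [show i + j - k = i + 1 + (j - 1) - k by omega]

-- shrinking an almost-palindrome whose end characters match
theorem pvAP_shrink (cs : List Char) (i j : Int) (hij : i + 2 ≤ j)
    (h : pvAP cs i j) : pvAP cs (i + 1) (j - 1) := by
  obtain ⟨k, hk | hk⟩ := h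
  · obtain ⟨k1, k2, k3, k4⟩ := hk
    rcases eq_or_lt_of_le k1 with hki | hki
    · -- k = i : the tail s[i+1..j] is a plain palindrome
      refine ⟨i + 1, Or.inl ⟨le_refl _, by omega, fun p hp1 hp2 => absurd hp2 (by omega), ?_⟩⟩
      rw [← hki, show i + j - i = j by omega] at k4
      rw [show i + 1 + (j - 1) - (i + 1) = j - 1 by omega]
      exact pvPal_mono cs (i + 1) j (i + 1 + 1) (j - 1) (by omega) (by omega) k4
    · rcases eq_or_lt_of_le k2 with hkj | hkj
      · -- k = j and k > i : the whole mirror shell holds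
        refine ⟨j - 1, Or.inl ⟨by omega, le_refl _, ?_, ?_⟩⟩
        · intro p hp1 hp2
          have := k3 p (by omega) (by omega)
          rwa [show i + j - p = i + 1 + (j - 1) - p by omega] at this
        · exact pvPal_of_ge cs (j - 1 + 1) (i + 1 + (j - 1) - (j - 1)) (by omega)
      · -- i < k < j
        refine ⟨k, Or.inl ⟨by omega, by omega, ?_, ?_⟩⟩
        · intro p hp1 hp2
          have := k3 p (by omega) hp2
          rwa [show i + j - p = i + 1 + (j - 1) - p by omega] at this
        · rwa [show i + 1 + (j - 1) - k = i + j - k by omega]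
  · obtain ⟨k1, k2, k3, k4⟩ := hk
    rcases eq_or_lt_of_le k2 with hkj | hkj
    · -- k = j : the head s[i..j-1] is a plain palindrome
      refine ⟨j - 1, Or.inr ⟨by omega, le_refl _, fun q hq1 hq2 => absurd hq1 (by omega), ?_⟩⟩
      rw [hkj] at k4
      rw [show i + 1 + (j - 1) - (j - 1) = i + 1 by omega]
      have : i + j - j = i ∧ j - 1 = j - 1 := by omega
      rw [this.1] at k4
      exact pvPal_mono cs i (j - 1) (i + 1) (j - 1 - 1) (by omega) (by omega) k4
    · rcases eq_or_lt_of_le k1 with hki | hki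
      · -- k = i and k < j : the whole mirror shell holds
        refine ⟨i + 1, Or.inr ⟨le_refl _, by omega, ?_, ?_⟩⟩
        · intro q hq1 hq2
          have := k3 q (by omega) (by omega)
          rwa [show i + j - q = i + 1 + (j - 1) - q by omega] at this
        · exact pvPal_of_ge cs (i + 1 + (j - 1) - (i + 1)) (i + 1 - 1) (by omega)
      · -- i < k < j
        refine ⟨k, Or.inr ⟨by omega, by omega, ?_, ?_⟩⟩
        · intro q hq1 hq2
          have := k3 q hq1 (by omega)
          rwa [show i + j - q = i + 1 + (j - 1) - q by omega] at this
        · rwa [show i + 1 + (j - 1) - k = i + j - k by omega]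

-- at a mismatch, almost-palindromicity is one of the two plain-palindrome skips
theorem pvAP_mismatch (cs : List Char) (i j : Int) (hij : i < j) (hne : pvG cs i ≠ pvG cs j) :
    pvAP cs i j ↔ (pvPal cs (i + 1) j ∨ pvPal cs i (j - 1)) := by
  constructor
  · rintro ⟨k, hk | hk⟩
    · obtain ⟨k1, k2, k3, k4⟩ := hk
      rcases eq_or_lt_of_le k1 with hki | hki
      · left
        rw [← hki, show i + j - i = j by omega] at k4
        exact k4
      · exact absurd (by
          have := k3 i (le_refl i) hki
          rwa [show i + j - i = j by omega] at this) hne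
    · obtain ⟨k1, k2, k3, k4⟩ := hk
      rcases eq_or_lt_of_le k2 with hkj | hkj
      · right
        rw [hkj] at k4
        rwa [show i + j - j = i from by omega, show j - 1 = j - 1 from rfl] at k4
      · exact absurd (by
          have := k3 j hkj (le_refl j)
          rw [show i + j - j = i by omega] at this
          exact this.symm) hne
  · rintro (hp | hp)
    · exact ⟨i, Or.inl ⟨le_refl i, by omega, fun p hp1 hp2 => absurd hp2 (by omega), by
        rwa [show i + j - i = j by omega]⟩⟩
    · exact ⟨j, Or.inr ⟨by omega, le_refl j, fun q hq1 hq2 => absurd hq1 (by omega), by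
        rwa [show i + j - j = i by omega]⟩⟩

-- ===== B's check decides almost-palindromicity =====

theorem pvOk_iff (cs : List Char) (n : Int) (hn : n = (cs.length : Int)) :
    ∀ i j : Int, 0 ≤ i → i ≤ j → j < n → (pvOk cs i j = true ↔ pvAP cs i j) := by
  intro i j
  induction i, j using pvWalk.induct cs with
  | case1 i j h ih =>
    intro h0 hij h1
    have heq : pvG cs i = pvG cs j :=
      (pvCond_bridge cs i j h0 (by omega) (by omega) (by omega)).1 h.2
    have hstep : pvOk cs i j = pvOk cs (i + 1) (j - 1) := by
      unfold pvOk
      rw [pvWalk_step cs i j h]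
    rw [hstep]
    rcases lt_or_ge (i + 1) (j - 1) with hlt | hge
    · rw [ih (by omega) (by omega) (by omega)]
      exact ⟨pvAP_grow cs i j (by omega) heq, pvAP_shrink cs i j (by omega)⟩
    · -- the walk crosses: length ≤ 2 below, both sides true
      rcases eq_or_lt_of_le hge with hcross | hcross
      · -- j - 1 = i + 1 : single character left; pvOk (i+1) (i+1) = true
        have : pvOk cs (i + 1) (j - 1) = true := by
          unfold pvOk
          rw [pvWalk_stop cs (i + 1) (j - 1) (fun hc => by omega)]
          simp [show (i + 1 : Int) ≥ j - 1 by omega]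
        rw [this]
        simp only [true_iff]
        rw [show j = i + 2 by omega] at heq ⊢
        exact pvAP_grow cs i (i + 2) (by omega) heq (by
          rw [show i + 2 - 1 = i + 1 by omega]; exact pvAP_len1 cs (i + 1))
      · -- j = i + 1 : walked past each other
        have : pvOk cs (i + 1) (j - 1) = true := by
          unfold pvOk
          rw [pvWalk_stop cs (i + 1) (j - 1) (fun hc => by omega)]
          simp [show (i + 1 : Int) ≥ j - 1 by omega]
        rw [this]
        simp only [true_iff]
        rw [show j = i + 1 by omega]
        exact pvAP_len2 cs i
  | case2 i j h =>
    intro h0 hij h1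
    have hstop : pvWalk cs i j = (i, j) := pvWalk_stop cs i j h
    rcases eq_or_lt_of_le hij with heq | hij'
    · -- i = j
      have : pvOk cs i j = true := by
        unfold pvOk
        rw [hstop]
        simp [show i ≥ j by omega]
      rw [this, ← heq]
      simp only [true_iff]
      exact pvAP_len1 cs i
    · -- i < j with a mismatch
      have hne : pvG cs i ≠ pvG cs j := by
        intro hc
        exact h ⟨hij', (pvCond_bridge cs i j h0 (by omega) (by omega) (by omega)).2 hc⟩
      have : pvOk cs i j = (pvIsPal cs (i + 1) j || pvIsPal cs i (j - 1)) := by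
        unfold pvOk
        rw [hstop]
        simp [show ¬ (i ≥ j) by omega]
      rw [this, pvAP_mismatch cs i j hij' hne]
      rw [Bool.or_eq_true, pvIsPal_iff cs n hn (i + 1) j (by omega) (by omega),
        pvIsPal_iff cs n hn i (j - 1) (by omega) (by omega)]

-- ===== fold shapes of the two main loops =====

theorem pvFoldMax2_le (f g : Int → Int) (M : Int) :
    ∀ (lst : List Int) (init : Int), init ≤ M → (∀ x ∈ lst, f x ≤ M ∧ g x ≤ M) →
      lst.foldl (fun a x => max (max a (f x)) (g x)) init ≤ M := by
  intro lst
  induction lst with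
  | nil => intro init h0 _; simpa using h0
  | cons x t ih =>
    intro init h0 h
    simp only [List.foldl_cons]
    refine ih _ ?_ (fun y hy => h y (List.mem_cons_of_mem x hy))
    have := h x (List.mem_cons_self)
    omega

theorem pvCondMax_ge (c : Int → Bool) :
    ∀ (lst : List Int) (init : Int),
      init ≤ lst.foldl (fun b L => if c L = true then max b L else b) init ∧
      ∀ L ∈ lst, c L = true → L ≤ lst.foldl (fun b L => if c L = true then max b L else b) init := by
  intro lst
  induction lst with
  | nil => intro init; simp
  | cons x t ih =>
    intro init
    simp only [List.foldl_cons]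
    constructor
    · refine le_trans ?_ (ih (if c x = true then max init x else init)).1
      split <;> omega
    · intro L hL hcL
      rcases List.mem_cons.1 hL with rfl | hmem
      · refine le_trans ?_ (ih (if c L = true then max init L else init)).1
        simp [hcL]
      · exact (ih _).2 L hmem hcL

theorem pvCondMax_le (c : Int → Bool) (M : Int) :
    ∀ (lst : List Int) (init : Int), init ≤ M → (∀ L ∈ lst, c L = true → L ≤ M) →
      lst.foldl (fun b L => if c L = true then max b L else b) init ≤ M := by
  intro lst
  induction lst with
  | nil => intro init h0 _; simpa using h0
  | cons x t ih =>
    intro init h0 h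
    simp only [List.foldl_cons]
    refine ih _ ?_ (fun y hy => h y (List.mem_cons_of_mem x hy))
    by_cases hcx : c x = true
    · simp only [hcx, if_true]
      have := h x (List.mem_cons_self) hcx
      omega
    · simp [hcx, h0]

-- any almost-palindromic substring bounds B's answer from below
theorem pvAP_le_alt (s : String) (i j : Int) (h0 : 0 ≤ i) (hij : i ≤ j)
    (hjn : j < (s.toList.length : Int)) (hAP : pvAP s.toList i j) :
    j - i + 1 ≤ almostPalindromic_alt s := by
  unfold almostPalindromic_alt
  have hmem : j - i + 1 ∈ PySem.List.pyRange 1 ((s.toList.length : Int) + 1) 1 :=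
    PySem.List.mem_pyRange_one.2 ⟨by omega, by omega⟩
  refine (pvCondMax_ge _ _ 0).2 (j - i + 1) hmem ?_
  rw [List.any_eq_true]
  refine ⟨i, PySem.List.mem_pyRange_one.2 ⟨h0, by omega⟩, ?_⟩
  rw [show i + (j - i + 1) - 1 = j by omega]
  exact (pvOk_iff s.toList (s.toList.length : Int) rfl i j h0 hij hjn).2 hAP

-- B's answer is nonnegative
theorem pvAlt_nonneg (s : String) : 0 ≤ almostPalindromic_alt s := by
  unfold almostPalindromic_alt
  exact (pvCondMax_ge _ _ 0).1

-- A's running maximum dominates every centre value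
theorem pvA_center_le (s : String) (c : Int) (h0 : 0 ≤ c) (hcn : c < (s.toList.length : Int)) :
    pvFA s.toList (s.toList.length : Int) c c ≤ almostPalindromic s ∧
    pvFA s.toList (s.toList.length : Int) c (c + 1) ≤ almostPalindromic s := by
  unfold almostPalindromic
  rw [PySem.List.foldl_congr_mem _ _
    (fun ans i => max ans (max (pvFA s.toList (s.toList.length : Int) i i)
      (pvFA s.toList (s.toList.length : Int) i (i + 1)))) 0
    (fun acc x _ => max_assoc acc _ _)]
  have := (PySem.List.le_foldl_max_int (PySem.List.pyRange 0 ((s.toList.length : Int)) 1)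
    (fun i => max (pvFA s.toList (s.toList.length : Int) i i)
      (pvFA s.toList (s.toList.length : Int) i (i + 1))) 0).2 c
    (PySem.List.mem_pyRange_one.2 ⟨h0, hcn⟩)
  constructor <;> [exact le_trans (le_max_left _ _) this; exact le_trans (le_max_right _ _) this]

-- A's answer is nonnegative
theorem pvA_nonneg (s : String) : 0 ≤ almostPalindromic s := by
  unfold almostPalindromic
  rw [PySem.List.foldl_congr_mem _ _
    (fun ans i => max ans (max (pvFA s.toList (s.toList.length : Int) i i)
      (pvFA s.toList (s.toList.length : Int) i (i + 1)))) 0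
    (fun acc x _ => max_assoc acc _ _)]
  exact (PySem.List.le_foldl_max_int _ _ 0).1

-- ===== completeness: every almost-palindromic substring is reached by some centre =====

theorem pvFA_ge_of_HL (cs : List Char) (n i j k l0 r0 : Int) (hn : n = (cs.length : Int))
    (h0 : 0 ≤ i) (hjn : j < n) (hil0 : i ≤ l0) (hl0j : l0 ≤ j)
    (hsum : l0 + r0 = i + j + 1) (hr0 : r0 = l0 ∨ r0 = l0 + 1)
    (hHL : pvHL cs i j k) : j - i + 1 ≤ pvFA cs n l0 r0 := by
  obtain ⟨k1, k2, k3, k4⟩ := hHL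
  have hr0nn : 0 ≤ r0 := by omega
  have E1 := pvExpand_spec cs n l0 r0 hn hr0nn
  set P := pvExpand cs n l0 r0 with hP
  obtain ⟨s1, s2, s3, s4, s5, s6⟩ := E1
  have hLk : P.1 ≤ k := by
    by_cases hkl : l0 ≤ k
    · omega
    · refine pvExpand_le cs n l0 r0 k hn hr0nn (by omega) (by omega) ?_
      intro p hp1 hp2
      have hin := k4 p (by omega) (by omega)
      rw [show k + 1 + (i + j - k) - p = l0 + r0 - p by omega] at hin
      exact ⟨by omega, by omega, by omega, hin⟩
  have E1Q := pvExpand_spec cs n (P.1 - 1) P.2 hn (by omega)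
  set Q := pvExpand cs n (P.1 - 1) P.2 with hQ
  obtain ⟨t1, t2, t3, t4, t5, t6⟩ := E1Q
  have hQi : Q.1 ≤ i - 1 := by
    by_cases hLi : P.1 - 1 ≤ i - 1
    · omega
    · refine pvExpand_le cs n (P.1 - 1) P.2 (i - 1) hn (by omega) (by omega) (by omega) ?_
      intro p hp1 hp2
      have hsh := k3 p (by omega) (by omega)
      rw [show i + j - p = P.1 - 1 + P.2 - p by omega] at hsh
      exact ⟨by omega, by omega, by omega, hsh⟩
  simp only [pvFA]
  rw [← hP, ← hQ]
  have hv1 : j - i + 1 ≤ Q.2 - Q.1 - 1 := by omega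
  have hjin : j - i + 1 ≤ n := by omega
  omega

theorem pvFA_ge_of_HR (cs : List Char) (n i j k l0 r0 : Int) (hn : n = (cs.length : Int))
    (h0 : 0 ≤ i) (hij : i < j) (hjn : j < n) (hil0 : i ≤ l0) (hl0j : l0 ≤ j)
    (hsum : l0 + r0 = i + j - 1) (hr0 : r0 = l0 ∨ r0 = l0 + 1)
    (hHR : pvHR cs i j k) : j - i + 1 ≤ pvFA cs n l0 r0 := by
  obtain ⟨k1, k2, k3, k4⟩ := hHR
  have hr0nn : 0 ≤ r0 := by omega
  have E1 := pvExpand_spec cs n l0 r0 hn hr0nn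
  set P := pvExpand cs n l0 r0 with hP
  obtain ⟨s1, s2, s3, s4, s5, s6⟩ := E1
  have hLk : P.1 ≤ i + j - 1 - k := by
    by_cases hkl : l0 ≤ i + j - 1 - k
    · omega
    · refine pvExpand_le cs n l0 r0 (i + j - 1 - k) hn hr0nn (by omega) (by omega) ?_
      intro p hp1 hp2
      have hin := k4 p (by omega) (by omega)
      rw [show i + j - k + (k - 1) - p = l0 + r0 - p by omega] at hin
      exact ⟨by omega, by omega, by omega, hin⟩
  have E1T := pvExpand_spec cs n P.1 (P.2 + 1) hn (by omega)
  set T := pvExpand cs n P.1 (P.2 + 1) with hT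
  obtain ⟨t1, t2, t3, t4, t5, t6⟩ := E1T
  have hTi : T.1 ≤ i - 1 := by
    by_cases hLi : P.1 ≤ i - 1
    · omega
    · refine pvExpand_le cs n P.1 (P.2 + 1) (i - 1) hn (by omega) (by omega) (by omega) ?_
      intro p hp1 hp2
      have hsh := k3 (i + j - p) (by omega) (by omega)
      rw [show i + j - (i + j - p) = p by omega] at hsh
      refine ⟨by omega, by omega, by omega, ?_⟩
      rw [show P.1 + (P.2 + 1) - p = i + j - p by omega]
      exact hsh.symm
  simp only [pvFA]
  rw [← hP, ← hT]
  have hv2 : j - i + 1 ≤ T.2 - T.1 - 1 := by omega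
  have hjin : j - i + 1 ≤ n := by omega
  omega

-- with a nonempty string, A's centre 0 already contributes at least 1
theorem pvFA00_pos (cs : List Char) (n : Int) (hn : n = (cs.length : Int)) (hpos : 1 ≤ n) :
    1 ≤ pvFA cs n 0 0 := by
  have hstep : pvExpand cs n 0 0 = pvExpand cs n (-1) 1 := by
    rw [pvExpand]
    simp [show (0 : Int) < n by omega]
  have E1 := pvExpand_spec cs n (-1) 1 hn (by omega)
  set P := pvExpand cs n (-1) 1 with hP
  obtain ⟨s1, s2, s3, s4, s5, s6⟩ := E1
  have E1Q := pvExpand_spec cs n (P.1 - 1) P.2 hn (by omega)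
  set Q := pvExpand cs n (P.1 - 1) P.2 with hQ
  obtain ⟨t1, t2, t3, t4, t5, t6⟩ := E1Q
  simp only [pvFA]
  rw [hstep, ← hQ]
  omega

-- completeness: any almost-palindromic substring bounds A's answer from below
theorem pvAP_le_A (s : String) (i j : Int) (h0 : 0 ≤ i) (hij : i ≤ j)
    (hjn : j < (s.toList.length : Int)) (hAP : pvAP s.toList i j) :
    j - i + 1 ≤ almostPalindromic s := by
  rcases eq_or_lt_of_le hij with heq | hij'
  · -- length-1 substring: A is at least 1 on a nonempty string
    have h1 := (pvA_center_le s 0 (le_refl 0) (by omega)).1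
    have h2 := pvFA00_pos s.toList (s.toList.length : Int) rfl (by omega)
    omega
  · obtain ⟨k, hk | hk⟩ := hAP
    · rcases Int.even_or_odd (i + j) with ⟨m, hm⟩ | ⟨m, hm⟩
      · have := pvFA_ge_of_HL s.toList (s.toList.length : Int) i j k m (m + 1) rfl h0 hjn
          (by omega) (by omega) (by omega) (Or.inr rfl) hk
        have hA := (pvA_center_le s m (by omega) (by omega)).2
        omega
      · have := pvFA_ge_of_HL s.toList (s.toList.length : Int) i j k (m + 1) (m + 1) rfl h0 hjn
          (by omega) (by omega) (by omega) (Or.inl rfl) hk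
        have hA := (pvA_center_le s (m + 1) (by omega) (by omega)).1
        omega
    · rcases Int.even_or_odd (i + j) with ⟨m, hm⟩ | ⟨m, hm⟩
      · have := pvFA_ge_of_HR s.toList (s.toList.length : Int) i j k (m - 1) m rfl h0 hij' hjn
          (by omega) (by omega) (by omega) (Or.inr (by omega)) hk
        have hA := (pvA_center_le s (m - 1) (by omega) (by omega)).2
        rw [show m - 1 + 1 = m by omega] at hA
        omega
      · have := pvFA_ge_of_HR s.toList (s.toList.length : Int) i j k m m rfl h0 hij' hjn
          (by omega) (by omega) (by omega) (Or.inl rfl) hk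
        have hA := (pvA_center_le s m (by omega) (by omega)).1
        omega

-- ===== soundness: every value A's branches produce is witnessed by an almost-palindromic substring =====

-- the skip-left branch value, given the maximal palindrome s[L+1..R-1] around a centre
theorem pvBranchL_le (s : String) (L R : Int) (hn1 : 1 ≤ (s.toList.length : Int))
    (hLR : L < R) (hL1 : -1 ≤ L) (hR0 : 0 ≤ R) (hRn : R ≤ (s.toList.length : Int))
    (hInner : pvPal s.toList (L + 1) (R - 1)) :
    min (s.toList.length : Int)
      ((pvExpand s.toList (s.toList.length : Int) (L - 1) R).2 -
       (pvExpand s.toList (s.toList.length : Int) (L - 1) R).1 - 1) ≤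
      almostPalindromic_alt s := by
  set n : Int := ((s.toList.length : Nat) : Int) with hnn
  set cs := s.toList with hcs
  by_cases hL0 : 0 ≤ L
  · have E1Q := pvExpand_spec cs n (L - 1) R rfl hR0
    set Q := pvExpand cs n (L - 1) R with hQ
    obtain ⟨t1, t2, t3, t4, t5, t6⟩ := E1Q
    have hQ1 : -1 ≤ Q.1 := t6 (by omega)
    have hQ2 : Q.2 ≤ n := t5 hRn
    have hAP : pvAP cs (Q.1 + 1) (Q.2 - 1) := by
      refine ⟨L, Or.inl ⟨by omega, by omega, ?_, ?_⟩⟩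
      · intro p hp1 hp2
        have := (t4 p (by omega) (by omega)).2.2.2
        rwa [show L - 1 + R - p = Q.1 + 1 + (Q.2 - 1) - p by omega] at this
      · rwa [show Q.1 + 1 + (Q.2 - 1) - L = R - 1 by omega]
    have := pvAP_le_alt s (Q.1 + 1) (Q.2 - 1) (by omega) (by omega) (by omega) hAP
    omega
  · -- L = -1 : the palindrome reaches the left edge; the skip loop cannot run
    have hLm1 : L = -1 := by omega
    have hQeq : pvExpand cs n (L - 1) R = (L - 1, R) := pvExpand_of_neg cs n (L - 1) R (by omega)
    rw [hQeq]
    simp only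
    by_cases hRn' : R < n
    · have hAP : pvAP cs 0 R := by
        refine ⟨R, Or.inr ⟨hR0, le_refl R, fun q hq1 hq2 => absurd hq1 (by omega), ?_⟩⟩
        rw [show (0 : Int) + R - R = 0 by omega]
        rw [hLm1] at hInner
        rwa [show (-1 : Int) + 1 = 0 by omega] at hInner
      have := pvAP_le_alt s 0 R (le_refl 0) hR0 hRn' hAP
      omega
    · -- R = n : the whole string is a palindrome
      have hRn'' : R = n := by omega
      have hAP : pvAP cs 0 (n - 1) := by
        refine pvAP_of_pal cs 0 (n - 1) (by omega) ?_
        rw [hLm1, hRn''] at hInner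
        rwa [show (-1 : Int) + 1 = 0 by omega] at hInner
      have := pvAP_le_alt s 0 (n - 1) (le_refl 0) (by omega) (by omega) hAP
      omega

-- the skip-right branch value
theorem pvBranchR_le (s : String) (L R : Int) (hn1 : 1 ≤ (s.toList.length : Int))
    (hLR : L < R) (hL1 : -1 ≤ L) (hR0 : 0 ≤ R) (hRn : R ≤ (s.toList.length : Int))
    (hInner : pvPal s.toList (L + 1) (R - 1)) :
    min (s.toList.length : Int)
      ((pvExpand s.toList (s.toList.length : Int) L (R + 1)).2 -
       (pvExpand s.toList (s.toList.length : Int) L (R + 1)).1 - 1) ≤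
      almostPalindromic_alt s := by
  set n : Int := ((s.toList.length : Nat) : Int) with hnn
  set cs := s.toList with hcs
  by_cases hRn' : R < n
  · have E1T := pvExpand_spec cs n L (R + 1) rfl (by omega)
    set T := pvExpand cs n L (R + 1) with hT
    obtain ⟨t1, t2, t3, t4, t5, t6⟩ := E1T
    have hT1 : -1 ≤ T.1 := by
      by_cases hL0 : 0 ≤ L
      · exact t6 (by omega)
      · have := pvExpand_of_neg cs n L (R + 1) (by omega)
        rw [← hT] at this
        rw [this]
        exact hL1
    have hT2 : T.2 ≤ n := t5 (by omega)
    have hAP : pvAP cs (T.1 + 1) (T.2 - 1) := by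
      refine ⟨R, Or.inr ⟨by omega, by omega, ?_, ?_⟩⟩
      · intro q hq1 hq2
        have := (t4 (T.1 + 1 + (T.2 - 1) - q) (by omega) (by omega)).2.2.2
        rw [show L + (R + 1) - (T.1 + 1 + (T.2 - 1) - q) = q by omega] at this
        exact this.symm
      · rwa [show T.1 + 1 + (T.2 - 1) - R = L + 1 by omega]
    have := pvAP_le_alt s (T.1 + 1) (T.2 - 1) (by omega) (by omega) (by omega) hAP
    omega
  · -- R = n : the palindrome reaches the right edge; the skip loop cannot run
    have hRn'' : R = n := by omega
    have hTeq : pvExpand cs n L (R + 1) = (L, R + 1) := pvExpand_of_ge cs n L (R + 1) (by omega)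
    rw [hTeq]
    simp only
    by_cases hL0 : 0 ≤ L
    · have hAP : pvAP cs L (n - 1) := by
        refine ⟨L, Or.inl ⟨le_refl L, by omega, fun p hp1 hp2 => absurd hp2 (by omega), ?_⟩⟩
        rw [show L + (n - 1) - L = n - 1 by omega]
        rwa [hRn''] at hInner
      have := pvAP_le_alt s L (n - 1) hL0 (by omega) (by omega) hAP
      omega
    · have hLm1 : L = -1 := by omega
      have hAP : pvAP cs 0 (n - 1) := by
        refine pvAP_of_pal cs 0 (n - 1) (by omega) ?_
        rw [hLm1, hRn''] at hInner
        rwa [show (-1 : Int) + 1 = 0 by omega] at hInner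
      have := pvAP_le_alt s 0 (n - 1) (le_refl 0) (by omega) (by omega) hAP
      omega

theorem pv_min_max_le {n x y M : Int} (h1 : min n x ≤ M) (h2 : min n y ≤ M) :
    min n (max x y) ≤ M := by
  rcases le_total x y with h | h
  · rw [max_eq_right h]; exact h2
  · rw [max_eq_left h]; exact h1

-- every centre value of A is at most B's answer
theorem pvFA_le_alt (s : String) (c r0 : Int) (h0 : 0 ≤ c) (hcn : c < (s.toList.length : Int))
    (hr0 : r0 = c ∨ r0 = c + 1) :
    pvFA s.toList (s.toList.length : Int) c r0 ≤ almostPalindromic_alt s := by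
  set n : Int := ((s.toList.length : Nat) : Int) with hnn
  set cs := s.toList with hcs
  -- facts about the first expansion
  have key : (pvExpand cs n c r0).1 < (pvExpand cs n c r0).2 ∧
      -1 ≤ (pvExpand cs n c r0).1 ∧ 0 ≤ (pvExpand cs n c r0).2 ∧ (pvExpand cs n c r0).2 ≤ n ∧
      pvPal cs ((pvExpand cs n c r0).1 + 1) ((pvExpand cs n c r0).2 - 1) := by
    rcases hr0 with h | h
    all_goals subst r0
    · have hstep : pvExpand cs n c c = pvExpand cs n (c - 1) (c + 1) := by
        rw [pvExpand]
        simp [show (0 : Int) ≤ c from h0, show c < n from hcn]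
      rw [hstep]
      have E1 := pvExpand_spec cs n (c - 1) (c + 1) rfl (by omega)
      set P := pvExpand cs n (c - 1) (c + 1) with hP
      obtain ⟨s1, s2, s3, s4, s5, s6⟩ := E1
      refine ⟨by omega, s6 (by omega), by omega, s5 (by omega), ?_⟩
      intro p hp1 hp2
      rcases lt_or_ge p c with hpc | hpc
      · have := (s4 p (by omega) (by omega)).2.2.2
        rwa [show c - 1 + (c + 1) - p = P.1 + 1 + (P.2 - 1) - p by omega] at this
      · have hpc' : p = c := by omega
        rw [hpc', show P.1 + 1 + (P.2 - 1) - c = c by omega]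
    · have E1 := pvExpand_spec cs n c (c + 1) rfl (by omega)
      set P := pvExpand cs n c (c + 1) with hP
      obtain ⟨s1, s2, s3, s4, s5, s6⟩ := E1
      refine ⟨by omega, s6 (by omega), by omega, s5 (by omega), ?_⟩
      intro p hp1 hp2
      have := (s4 p (by omega) (by omega)).2.2.2
      rwa [show c + (c + 1) - p = P.1 + 1 + (P.2 - 1) - p by omega] at this
  obtain ⟨hLR, hL1, hR0, hRn, hInner⟩ := key
  have hb1 := pvBranchL_le s (pvExpand cs n c r0).1 (pvExpand cs n c r0).2 (by omega)
    hLR hL1 hR0 hRn hInner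
  have hb2 := pvBranchR_le s (pvExpand cs n c r0).1 (pvExpand cs n c r0).2 (by omega)
    hLR hL1 hR0 hRn hInner
  simp only [pvFA]
  exact pv_min_max_le hb1 hb2

theorem almostPalindromic_spec : Claim_equal_almostPalindromic := by
  intro s _hDom
  unfold Spec_almostPalindromic
  apply le_antisymm
  · -- A ≤ B : soundness of every centre value
    unfold almostPalindromic
    refine pvFoldMax2_le _ _ _ _ 0 (pvAlt_nonneg s) ?_
    intro x hx
    have hm := PySem.List.mem_pyRange_one.1 hx
    exact ⟨pvFA_le_alt s x x hm.1 (by omega) (Or.inl rfl),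
      pvFA_le_alt s x (x + 1) hm.1 (by omega) (Or.inr rfl)⟩
  · -- B ≤ A : completeness, through the hit substring
    unfold almostPalindromic_alt
    refine pvCondMax_le _ _ _ 0 (pvA_nonneg s) ?_
    intro L hL hcL
    have hm := PySem.List.mem_pyRange_one.1 hL
    rw [List.any_eq_true] at hcL
    obtain ⟨i, hi, hok⟩ := hcL
    have hmi := PySem.List.mem_pyRange_one.1 hi
    have hAP := (pvOk_iff s.toList (s.toList.length : Int) rfl i (i + L - 1)
      hmi.1 (by omega) (by omega)).1 hok
    have := pvAP_le_A s i (i + L - 1) hmi.1 (by omega) (by omega) hAP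
    omega
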